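-- pv_equiv track=rewrite | github.com/argilo/secplus | secplus.py | _decode_v2_rolling
-- ===== SOURCE A (Python) =====
-- def _reverse_int(n, bits):
--     result = 0
--     for _ in range(bits):
--         result = (result << 1) | (n & 1)
--         n >>= 1
--     return result
--
-- def _decode_v2_rolling(rolling1, rolling2):
--     rolling_digits = rolling2[8:] + rolling1[8:]
--     rolling_digits += rolling2[4:8] + rolling1[4:8]
--     rolling_digits += rolling2[:4] + rolling1[:4]
--
--     rolling = 0
--     for digit in rolling_digits:
--         rolling = (rolling * 3) + digit
--     if rolling >= 2**28:
--         raise ValueError("Rolling code was not in expected range")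
--     return _reverse_int(rolling, 28)
-- ===== SOURCE B (Python) =====
-- # Table-driven nibble reversal and a right-to-left positional base-3 accumulation
-- # replacing A's Horner loop and bit-by-bit shift/or reversal.
--
-- _REV4 = (0b0000, 0b1000, 0b0100, 0b1100, 0b0010, 0b1010, 0b0110, 0b1110,
--          0b0001, 0b1001, 0b0101, 0b1101, 0b0011, 0b1011, 0b0111, 0b1111)
--
--
-- def _decode_v2_rolling(rolling1, rolling2):
--     rolling = 0
--     power = 1
--     for block in (rolling1[:4], rolling2[:4], rolling1[4:8], rolling2[4:8],
--                   rolling1[8:], rolling2[8:]):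
--         for digit in reversed(block):
--             rolling += digit * power
--             power *= 3
--     if rolling >= 2 ** 28:
--         raise ValueError("Rolling code was not in expected range")
--     out = 0
--     for j in range(7):
--         out += _REV4[(rolling >> (4 * j)) & 0xF] << (24 - 4 * j)
--     return out
-- ===== Notes on version B (the rewrite author's own statement) =====
-- stated objective: alternative
-- what changed: The base-3 conversion walks the digit sequence back-to-front carrying a running power of 3 (two accumulators) instead of A's most-significant-first Horner fold, and the 28-iteration shift/or bit-reversal loop is replaced by a 16-entry nibble-reversal lookup table applied once to each of the 7 nibbles (7 table lookups instead of 28 shift/mask steps).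
import Mathlib
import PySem

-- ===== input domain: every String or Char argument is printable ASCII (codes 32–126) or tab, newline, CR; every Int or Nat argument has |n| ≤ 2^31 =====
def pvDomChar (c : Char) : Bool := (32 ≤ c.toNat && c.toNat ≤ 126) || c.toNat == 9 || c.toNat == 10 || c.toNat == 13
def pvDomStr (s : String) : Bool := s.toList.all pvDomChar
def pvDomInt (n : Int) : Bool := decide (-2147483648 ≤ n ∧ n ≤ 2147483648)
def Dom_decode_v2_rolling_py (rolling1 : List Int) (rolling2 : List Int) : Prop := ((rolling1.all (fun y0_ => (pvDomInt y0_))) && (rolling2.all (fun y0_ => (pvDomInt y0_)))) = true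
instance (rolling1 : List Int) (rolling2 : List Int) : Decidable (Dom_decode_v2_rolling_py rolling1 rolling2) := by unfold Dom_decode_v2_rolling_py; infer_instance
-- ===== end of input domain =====

-- B replaces A's most-significant-first Horner fold by a back-to-front positional
-- accumulation carrying a running power of 3, and A's 28-iteration shift/or bit
-- reversal by a 16-entry nibble-reversal lookup table applied to the 7 nibbles
-- (objective: alternative decomposition, same cost).

-- ===== PORT A =====
-- _reverse_int: loop 'for _ in range(bits)' carrying (result, n);
-- '<<<'/'>>>' are Python's shifts, bor/band are Python's '|'/'&' (PySem, exact on negatives)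
def reverse_int_py (n : Int) (bits : Int) : Int :=
  ((PySem.List.pyRange 0 bits 1).foldl
      (fun st _ => (PySem.Int.bor (st.1 <<< (1 : Nat)) (PySem.Int.band st.2 1), st.2 >>> (1 : Nat)))
      (0, n)).1

def decode_v2_rolling_py (rolling1 : List Int) (rolling2 : List Int) : Int :=
  let rolling_digits := PySem.List.slice rolling2 (some 8) none ++ PySem.List.slice rolling1 (some 8) none
  let rolling_digits := rolling_digits ++ (PySem.List.slice rolling2 (some 4) (some 8) ++ PySem.List.slice rolling1 (some 4) (some 8))
  let rolling_digits := rolling_digits ++ (PySem.List.slice rolling2 none (some 4) ++ PySem.List.slice rolling1 none (some 4))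
  let rolling := rolling_digits.foldl (fun acc d => acc * 3 + d) 0
  if rolling ≥ 2 ^ 28 then 0   -- 'raise ValueError(...)': excluded by Pre_decode_v2_rolling_py
  else reverse_int_py rolling 28

-- ===== PORT B =====
-- _REV4: bit-reversal table for one nibble
def pvRev4 : List Int := [0, 8, 4, 12, 2, 10, 6, 14, 1, 9, 5, 13, 3, 11, 7, 15]

def decode_v2_rolling_py_alt (rolling1 : List Int) (rolling2 : List Int) : Int :=
  -- for block in (r1[:4], r2[:4], r1[4:8], r2[4:8], r1[8:], r2[8:]): for digit in reversed(block): …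
  let blocks := [PySem.List.slice rolling1 none (some 4), PySem.List.slice rolling2 none (some 4),
                 PySem.List.slice rolling1 (some 4) (some 8), PySem.List.slice rolling2 (some 4) (some 8),
                 PySem.List.slice rolling1 (some 8) none, PySem.List.slice rolling2 (some 8) none]
  let st := blocks.foldl
      (fun st b => b.reverse.foldl (fun st d => (st.1 + d * st.2, st.2 * 3)) st)
      ((0 : Int), (1 : Int))
  let rolling := st.1
  if rolling ≥ 2 ^ 28 then 0   -- 'raise ValueError(...)': excluded by Pre_decode_v2_rolling_py
  else
    -- for j in range(7): out += _REV4[(rolling >> (4*j)) % 16] << (24 - 4*j)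
    -- the index is always in 0..15, so the list access never raises: pyGetD is exact here
    (PySem.List.pyRange 0 7 1).foldl
      (fun out j => out + (PySem.List.pyGetD pvRev4 (PySem.Int.mod (rolling >>> (4 * j).toNat) 16) 0) <<< ((24 - 4 * j).toNat))
      0

-- ===== PRECONDITION & SPEC =====
-- Closed-form value of the rolling code: the base-3 positional sum of the reordered digits.
def pvRollCode (rolling1 : List Int) (rolling2 : List Int) : Int :=
  (((PySem.List.slice rolling2 (some 8) none ++ PySem.List.slice rolling1 (some 8) none
      ++ PySem.List.slice rolling2 (some 4) (some 8) ++ PySem.List.slice rolling1 (some 4) (some 8)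
      ++ PySem.List.slice rolling2 none (some 4) ++ PySem.List.slice rolling1 none (some 4)).reverse.zipIdx).map
    (fun dk => dk.1 * 3 ^ dk.2)).sum

-- Pre_ excludes exactly the inputs whose rolling code is ≥ 2^28, where the Python A raises ValueError.
def Pre_decode_v2_rolling_py (rolling1 : List Int) (rolling2 : List Int) : Prop :=
  pvRollCode rolling1 rolling2 < 2 ^ 28
instance (rolling1 : List Int) (rolling2 : List Int) : Decidable (Pre_decode_v2_rolling_py rolling1 rolling2) := by unfold Pre_decode_v2_rolling_py; infer_instance

def pvWitness_decode_v2_rolling_py : List Int × List Int :=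
  ([0, 1, 2, 0, 1, 2, 0, 1, 2], [2, 1, 0, 2, 1, 0, 2, 1, 0])

def Spec_decode_v2_rolling_py (rolling1 : List Int) (rolling2 : List Int) (out : Int) : Prop := out = decode_v2_rolling_py_alt rolling1 rolling2
instance (rolling1 : List Int) (rolling2 : List Int) (out : Int) : Decidable (Spec_decode_v2_rolling_py rolling1 rolling2 out) := by unfold Spec_decode_v2_rolling_py; infer_instance

-- ===== CLAIM (what is proved, stated in full; the proofs are below) =====
def Claim_equal_decode_v2_rolling_py : Prop := ∀ (rolling1 : List Int) (rolling2 : List Int), Dom_decode_v2_rolling_py rolling1 rolling2 → Pre_decode_v2_rolling_py rolling1 rolling2 → Spec_decode_v2_rolling_py rolling1 rolling2 (decode_v2_rolling_py rolling1 rolling2)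

-- ===== LEMMAS AND PROOFS =====

-- Horner fold with a general accumulator
theorem pv_horner_acc (ds : List Int) (a : Int) :
    ds.foldl (fun acc d => acc * 3 + d) a
      = a * 3 ^ ds.length + ds.foldl (fun acc d => acc * 3 + d) 0 := by
  induction ds generalizing a with
  | nil => simp
  | cons d t ih =>
    simp only [List.foldl_cons, List.length_cons]
    rw [ih (a * 3 + d), ih (0 * 3 + d)]
    ring

-- B's back-to-front accumulation (running power of 3) computes Horner's value
theorem pv_rtl (ds : List Int) (a p : Int) :
    ds.reverse.foldl (fun st d => (st.1 + d * st.2, st.2 * 3)) (a, p)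
      = (a + p * ds.foldl (fun acc d => acc * 3 + d) 0, p * 3 ^ ds.length) := by
  induction ds generalizing a p with
  | nil => simp
  | cons d t ih =>
    simp only [List.reverse_cons, List.foldl_append, List.foldl_cons, List.foldl_nil,
      List.length_cons, ih]
    rw [pv_horner_acc t (0 * 3 + d)]
    refine Prod.ext ?_ ?_ <;> simp <;> ring

-- bit k of n, in {0,1}
theorem pv_band_one_cases (m : Int) :
    PySem.Int.band m 1 = 0 ∨ PySem.Int.band m 1 = 1 := by
  rw [PySem.Int.band_one]
  have h1 := PySem.Int.mod_nonneg m (b := 2) (by norm_num)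
  have h2 := PySem.Int.mod_lt m (b := 2) (by norm_num)
  omega

def pvBitSum (b : Nat) (n : Int) : Int :=
  ((List.range b).map (fun (i : Nat) => PySem.Int.band (n >>> i) 1 * 2 ^ (b - 1 - i))).sum

theorem pv_bitSum_nonneg (b : Nat) (n : Int) : 0 ≤ pvBitSum b n := by
  apply List.sum_nonneg
  intro x hx
  simp only [List.mem_map] at hx
  obtain ⟨i, _, rfl⟩ := hx
  rcases pv_band_one_cases (n >>> i) with h | h <;> rw [h]
  · simp
  · simp only [one_mul]
    positivity

theorem pv_nat_two_mul_or_one (a : Nat) : 2 * a ||| 1 = 2 * a + 1 := by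
  have h2 : 2 * a = Nat.bit false a := by simp [Nat.bit_val]
  have h1 : (1 : Nat) = Nat.bit true 0 := by simp [Nat.bit_val]
  rw [h2, h1, Nat.lor_bit]
  simp [Nat.bit_val]

theorem pv_bor_shift (r c : Int) (hr : 0 ≤ r) (hc : c = 0 ∨ c = 1) :
    PySem.Int.bor (r <<< (1 : Nat)) c = 2 * r + c := by
  have hs : r <<< (1 : Nat) = 2 * r := by rw [Int.shiftLeft_eq]; ring
  rcases hc with rfl | rfl
  · simp [hs, PySem.Int.bor_zero]
  · rw [PySem.Int.bor_of_nonneg (by omega) (by norm_num), hs]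
    have ht : (2 * r).toNat = 2 * r.toNat := by omega
    have h1 : (1 : Int).toNat = 1 := rfl
    rw [ht, h1, pv_nat_two_mul_or_one]
    omega

-- invariant of A's reversal loop: after b steps the pair is (r·2^b + bit-sum, n >> b)
theorem pv_rev_loop (b : Nat) (n r : Int) (hr : 0 ≤ r) :
    (List.range b).foldl
        (fun st (_ : Nat) => (PySem.Int.bor (st.1 <<< (1 : Nat)) (PySem.Int.band st.2 1), st.2 >>> (1 : Nat)))
        (r, n)
      = (r * 2 ^ b + pvBitSum b n, n >>> b) := by
  induction b with
  | zero => simp [pvBitSum]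
  | succ b ih =>
    rw [List.range_succ, List.foldl_append, ih]
    simp only [List.foldl_cons, List.foldl_nil]
    refine Prod.ext ?_ ?_
    · rw [pv_bor_shift _ _ (by have := pv_bitSum_nonneg b n; positivity)
            (pv_band_one_cases (n >>> b))]
      have hsum : pvBitSum (b + 1) n
          = 2 * pvBitSum b n + PySem.Int.band (n >>> b) 1 := by
        unfold pvBitSum
        rw [List.range_succ, List.map_append, List.sum_append]
        have hcg : (List.range b).map (fun (i : Nat) => PySem.Int.band (n >>> i) 1 * 2 ^ (b + 1 - 1 - i))
            = (List.range b).map (fun (i : Nat) => 2 * (PySem.Int.band (n >>> i) 1 * 2 ^ (b - 1 - i))) := by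
          apply List.map_congr_left
          intro i hi
          have hib : i < b := List.mem_range.mp hi
          have : b + 1 - 1 - i = (b - 1 - i) + 1 := by omega
          rw [this, pow_succ]
          ring
        rw [hcg, List.sum_map_mul_left]
        simp
      rw [hsum]
      ring
    · exact (Int.shiftRight_add n b 1).symm

-- A's reversal loop computes the 28-bit bit-sum
theorem pv_reverse_eq_bitSum (n : Int) : reverse_int_py n 28 = pvBitSum 28 n := by
  unfold reverse_int_py
  rw [PySem.List.pyRange_one]
  have h28 : ((28 : Int) - 0).toNat = 28 := by decide
  rw [h28, List.foldl_map, pv_rev_loop 28 n 0 le_rfl]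
  simp

-- one nibble through the table: _REV4[m % 16] is the bit-reversal of m's low nibble
theorem pv_nib (m : Int) :
    PySem.List.pyGetD pvRev4 (m % 16) 0
      = m % 2 * 8 + (m >>> (1 : Nat)) % 2 * 4 + (m >>> (2 : Nat)) % 2 * 2 + (m >>> (3 : Nat)) % 2 := by
  rw [Int.shiftRight_eq_div_pow, Int.shiftRight_eq_div_pow, Int.shiftRight_eq_div_pow]
  norm_num
  have h0 : m % 2 = m % 16 % 2 := by omega
  have h1 : m / 2 % 2 = m % 16 / 2 % 2 := by omega
  have h2 : m / 4 % 2 = m % 16 / 4 % 2 := by omega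
  have h3 : m / 8 % 2 = m % 16 / 8 % 2 := by omega
  rw [h0, h1, h2, h3]
  have hlo : 0 ≤ m % 16 := Int.emod_nonneg m (by norm_num)
  have hhi : m % 16 < 16 := Int.emod_lt_of_pos m (by norm_num)
  interval_cases (m % 16) <;> decide

-- the table-driven nibble loop equals A's bit-by-bit reversal
set_option maxHeartbeats 2000000 in
theorem pv_rev_eq_nib (n : Int) :
    reverse_int_py n 28
      = (PySem.List.pyRange 0 7 1).foldl
          (fun out j => out + (PySem.List.pyGetD pvRev4 (PySem.Int.mod (n >>> (4 * j).toNat) 16) 0) <<< ((24 - 4 * j).toNat))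
          0 := by
  rw [pv_reverse_eq_bitSum]
  have hr7 : PySem.List.pyRange 0 7 1 = [0, 1, 2, 3, 4, 5, 6] := by decide
  rw [hr7]
  simp only [List.foldl_cons, List.foldl_nil, zero_add]
  simp only [Int.shiftRight_natCast_right, Int.shiftLeft_natCast_right]
  simp only [show ((4:Int) * 0).toNat = 0 by decide, show ((4:Int) * 1).toNat = 4 by decide,
    show ((4:Int) * 2).toNat = 8 by decide, show ((4:Int) * 3).toNat = 12 by decide,
    show ((4:Int) * 4).toNat = 16 by decide, show ((4:Int) * 5).toNat = 20 by decide,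
    show ((4:Int) * 6).toNat = 24 by decide,
    show ((24:Int) - 4 * 0).toNat = 24 by decide, show ((24:Int) - 4 * 1).toNat = 20 by decide,
    show ((24:Int) - 4 * 2).toNat = 16 by decide, show ((24:Int) - 4 * 3).toNat = 12 by decide,
    show ((24:Int) - 4 * 4).toNat = 8 by decide, show ((24:Int) - 4 * 5).toNat = 4 by decide,
    show ((24:Int) - 4 * 6).toNat = 0 by decide]
  have hmod16 : ∀ a : Int, PySem.Int.mod a 16 = a % 16 := fun a =>
    PySem.Int.mod_eq_emod_of_pos (by norm_num)
  simp only [hmod16, pv_nib]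
  have hm2 : ∀ a : Int, PySem.Int.band a 1 = a % 2 := fun a => by
    rw [PySem.Int.band_one, PySem.Int.mod_eq_emod_of_pos (by norm_num)]
  have hR : List.range 28 = [0,1,2,3,4,5,6,7,8,9,10,11,12,13,14,15,16,17,18,19,20,21,22,23,24,25,26,27] := by decide
  unfold pvBitSum
  rw [hR]
  simp only [List.map_cons, List.map_nil, List.sum_cons, List.sum_nil, hm2, add_zero]
  simp only [Int.shiftRight_eq_div_pow, Int.shiftLeft_eq]
  norm_num
  have hd1_1 : n / 16 / 2 = n / 32 := by
    rw [Int.ediv_ediv_of_nonneg (by norm_num)]; norm_num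
  have hd1_2 : n / 16 / 4 = n / 64 := by
    rw [Int.ediv_ediv_of_nonneg (by norm_num)]; norm_num
  have hd1_3 : n / 16 / 8 = n / 128 := by
    rw [Int.ediv_ediv_of_nonneg (by norm_num)]; norm_num
  have hd2_1 : n / 256 / 2 = n / 512 := by
    rw [Int.ediv_ediv_of_nonneg (by norm_num)]; norm_num
  have hd2_2 : n / 256 / 4 = n / 1024 := by
    rw [Int.ediv_ediv_of_nonneg (by norm_num)]; norm_num
  have hd2_3 : n / 256 / 8 = n / 2048 := by
    rw [Int.ediv_ediv_of_nonneg (by norm_num)]; norm_num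
  have hd3_1 : n / 4096 / 2 = n / 8192 := by
    rw [Int.ediv_ediv_of_nonneg (by norm_num)]; norm_num
  have hd3_2 : n / 4096 / 4 = n / 16384 := by
    rw [Int.ediv_ediv_of_nonneg (by norm_num)]; norm_num
  have hd3_3 : n / 4096 / 8 = n / 32768 := by
    rw [Int.ediv_ediv_of_nonneg (by norm_num)]; norm_num
  have hd4_1 : n / 65536 / 2 = n / 131072 := by
    rw [Int.ediv_ediv_of_nonneg (by norm_num)]; norm_num
  have hd4_2 : n / 65536 / 4 = n / 262144 := by
    rw [Int.ediv_ediv_of_nonneg (by norm_num)]; norm_num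
  have hd4_3 : n / 65536 / 8 = n / 524288 := by
    rw [Int.ediv_ediv_of_nonneg (by norm_num)]; norm_num
  have hd5_1 : n / 1048576 / 2 = n / 2097152 := by
    rw [Int.ediv_ediv_of_nonneg (by norm_num)]; norm_num
  have hd5_2 : n / 1048576 / 4 = n / 4194304 := by
    rw [Int.ediv_ediv_of_nonneg (by norm_num)]; norm_num
  have hd5_3 : n / 1048576 / 8 = n / 8388608 := by
    rw [Int.ediv_ediv_of_nonneg (by norm_num)]; norm_num
  have hd6_1 : n / 16777216 / 2 = n / 33554432 := by
    rw [Int.ediv_ediv_of_nonneg (by norm_num)]; norm_num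
  have hd6_2 : n / 16777216 / 4 = n / 67108864 := by
    rw [Int.ediv_ediv_of_nonneg (by norm_num)]; norm_num
  have hd6_3 : n / 16777216 / 8 = n / 134217728 := by
    rw [Int.ediv_ediv_of_nonneg (by norm_num)]; norm_num
  simp only [hd1_1, hd1_2, hd1_3, hd2_1, hd2_2, hd2_3, hd3_1, hd3_2, hd3_3, hd4_1, hd4_2, hd4_3, hd5_1, hd5_2, hd5_3, hd6_1, hd6_2, hd6_3]
  ring

-- ===== VERDICT (by name: the statement is the Claim_ definition above) =====
theorem decode_v2_rolling_py_spec : Claim_equal_decode_v2_rolling_py := by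
  intro rolling1 rolling2 _hDom _hPre
  unfold Spec_decode_v2_rolling_py decode_v2_rolling_py decode_v2_rolling_py_alt
  simp only [List.foldl_cons, List.foldl_nil]
  -- B's nested block fold is the fold of the flattened reversed digit list
  rw [show ∀ (B1 B2 B3 B4 B5 B6 : List Int) (st : Int × Int),
        (B6.reverse.foldl (fun st d => (st.1 + d * st.2, st.2 * 3))
          (B5.reverse.foldl (fun st d => (st.1 + d * st.2, st.2 * 3))
            (B4.reverse.foldl (fun st d => (st.1 + d * st.2, st.2 * 3))
              (B3.reverse.foldl (fun st d => (st.1 + d * st.2, st.2 * 3))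
                (B2.reverse.foldl (fun st d => (st.1 + d * st.2, st.2 * 3))
                  (B1.reverse.foldl (fun st d => (st.1 + d * st.2, st.2 * 3)) st))))))
          = ((B6 ++ B5 ++ B4 ++ B3 ++ B2 ++ B1).reverse.foldl (fun st d => (st.1 + d * st.2, st.2 * 3)) st)
      from fun B1 B2 B3 B4 B5 B6 st => by
        simp [List.reverse_append, List.foldl_append]]
  rw [pv_rtl]
  simp only [zero_add, one_mul]
  rw [pv_rev_eq_nib]
  simp [List.append_assoc]
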